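-- pv_equiv track=rewrite | github.com/NoridelHerron/code-file-generator | utilities/shared_helpers.py | Add_Function
-- ===== SOURCE A (Python) =====
-- def Print_Sep(star=False):
--     if star:
--         result = "*" * 60
--     else:
--         result = "=" * 60
--     # ************
--     return result
--
-- def Add_Function(num, comment):
--     result = ""
--
--     for _ in range(num):
--         result += (
--             "\ndef Function_Name():\n"
--             "    pass\n\n"
--             f"{comment} {Print_Sep(True)}\n"
--         )
--
--     # ************
--     return result
-- ===== SOURCE B (Python) =====
-- def Add_Function(num, comment):
--     block = (
--         "\ndef Function_Name():\n"
--         "    pass\n\n"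
--         f"{comment} {'*' * 60}\n"
--     )
--     return block * num
-- ===== Notes on version B (the rewrite author's own statement) =====
-- stated objective: simpler
-- what changed: B builds the repeated block string once and returns block * num (closed-form string replication) instead of A's loop that re-appends the block num times.
import Mathlib
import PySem

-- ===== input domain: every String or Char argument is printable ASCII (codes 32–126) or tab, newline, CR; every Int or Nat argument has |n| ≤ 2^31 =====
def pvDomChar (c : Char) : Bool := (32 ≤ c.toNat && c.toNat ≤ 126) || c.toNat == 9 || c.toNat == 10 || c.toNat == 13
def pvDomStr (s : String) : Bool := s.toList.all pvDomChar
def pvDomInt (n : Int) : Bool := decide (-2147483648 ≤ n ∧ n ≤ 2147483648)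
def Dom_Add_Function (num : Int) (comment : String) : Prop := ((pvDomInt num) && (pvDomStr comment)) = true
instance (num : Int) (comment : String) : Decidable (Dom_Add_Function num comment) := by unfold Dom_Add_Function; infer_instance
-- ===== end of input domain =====

-- B computes the repeated block once and replicates it (string multiplication) instead of A's loop of appends; objective: simpler.


-- ===== PORT A =====
-- "*" * 60 / "=" * 60 ported with PySem.List.pyRepeat (exact for str * int)
def Print_Sep (star : Bool) : String :=
  if star then String.ofList (PySem.List.pyRepeat ['*'] 60)
  else String.ofList (PySem.List.pyRepeat ['='] 60)

def Add_Function (num : Int) (comment : String) : String :=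
  (PySem.List.pyRange 0 num 1).foldl
    (fun result _ =>
      result ++ ("\ndef Function_Name():\n    pass\n\n" ++ comment ++ " " ++ Print_Sep true ++ "\n"))
    ""

-- ===== PORT B =====
def Add_Function_alt (num : Int) (comment : String) : String :=
  let block :=
    "\ndef Function_Name():\n    pass\n\n" ++ comment ++ " "
      ++ String.ofList (PySem.List.pyRepeat ['*'] 60) ++ "\n"
  String.ofList (PySem.List.pyRepeat block.toList num)

-- ===== PRECONDITION & SPEC =====
def Spec_Add_Function (num : Int) (comment : String) (out : String) : Prop := out = Add_Function_alt num comment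
instance (num : Int) (comment : String) (out : String) : Decidable (Spec_Add_Function num comment out) := by unfold Spec_Add_Function; infer_instance

-- ===== CLAIM (what is proved, stated in full; the proofs are below) =====
def Claim_equal_Add_Function : Prop := ∀ (num : Int) (comment : String), Dom_Add_Function num comment → Spec_Add_Function num comment (Add_Function num comment)

-- ===== LEMMAS AND PROOFS =====
-- A's loop appends the same block once per iteration: it equals the flattened replication of the block.
theorem pv_fold_rep (l : List Int) (b a : String) :
    l.foldl (fun r _ => r ++ b) a = a ++ String.ofList ((List.replicate l.length b.toList).flatten) := by
  induction l generalizing a with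
  | nil => apply String.toList_inj.mp; simp
  | cons x t ih =>
      simp only [List.foldl_cons, ih, List.length_cons, List.replicate_succ, List.flatten_cons]
      apply String.toList_inj.mp
      simp

-- ===== VERDICT (by name: the statement is the Claim_ definition above) =====
theorem Add_Function_spec : Claim_equal_Add_Function := by
  intro num comment _
  unfold Spec_Add_Function Add_Function Add_Function_alt
  rw [pv_fold_rep]
  apply String.toList_inj.mp
  simp [Print_Sep, PySem.List.pyRepeat, PySem.List.length_pyRange_one]
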